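-- pv_equiv track=rewrite | github.com/Nmdk1/StrideIQ | apps/api/services/barcode_lookup.py | _upc_variants
-- ===== SOURCE A (Python) =====
-- from typing import List, Optional
--
-- def _upc_variants(upc: str) -> List[str]:
--     """Generate GTIN format variants for a scanned UPC."""
--     digits = upc.lstrip("0") or "0"
--     variants = [upc]
--     for length in (8, 12, 13, 14):
--         padded = digits.zfill(length)
--         if padded != upc:
--             variants.append(padded)
--     full_padded = upc.zfill(14)
--     if full_padded not in variants:
--         variants.append(full_padded)
--     return variants
-- ===== SOURCE B (Python) =====
-- def _upc_variants(upc: str) -> list: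
--     """Generate GTIN format variants for a scanned UPC."""
--     digits = upc.lstrip("0") or "0"
--     candidates = [upc, digits.zfill(8), digits.zfill(12), digits.zfill(13),
--                   digits.zfill(14), upc.zfill(14)]
--     return list(dict.fromkeys(candidates))
-- ===== Notes on version B (the rewrite author's own statement) =====
-- stated objective: idiomatic
-- what changed: Generation and deduplication are separated: B builds the full ordered candidate list in one expression and dedups it with dict.fromkeys, instead of A's loop that interleaves a padded != upc guard per iteration plus a final membership test.
-- intended difference: On inputs starting with '0' whose zero-stripped remainder has at least 12 characters, A's padded != upc guard lets the same padded string be appended several times (e.g. '0111111111111' yields '111111111111' twice), while B returns each variant once; a duplicate-free variants list is what the function intends. — e.g. on _upc_variants("0111111111111"): A returns ["0111111111111", "111111111111", "111111111111", "00111111111111"], B returns ["0111111111111", "111111111111", "00111111111111"]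
import Mathlib
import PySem

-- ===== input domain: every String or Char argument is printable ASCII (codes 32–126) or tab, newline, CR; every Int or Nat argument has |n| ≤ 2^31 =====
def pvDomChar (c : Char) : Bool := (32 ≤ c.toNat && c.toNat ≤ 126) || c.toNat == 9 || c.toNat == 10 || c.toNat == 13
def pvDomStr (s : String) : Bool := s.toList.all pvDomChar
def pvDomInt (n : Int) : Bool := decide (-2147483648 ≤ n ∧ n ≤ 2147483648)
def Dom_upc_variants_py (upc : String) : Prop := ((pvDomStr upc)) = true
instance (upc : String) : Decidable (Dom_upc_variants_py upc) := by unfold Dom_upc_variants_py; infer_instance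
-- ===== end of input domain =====

-- B separates candidate generation from deduplication (one ordered candidate list, then a
-- first-occurrence dedup, Python's list(dict.fromkeys(...))) instead of A's loop that interleaves
-- a `padded != upc` guard per iteration plus a final membership test. Return values only.

-- ===== PORT A =====
def upc_variants_py (upc : String) : List String :=
  -- upc.lstrip("0") drops leading '0' characters (exact); `or "0"` is the empty-string test
  let stripped := String.ofList (upc.toList.dropWhile (fun c => c == '0'))
  let digits := if stripped = "" then "0" else stripped
  let variants : List String := [upc]
  let variants := [(8 : Int), 12, 13, 14].foldl (fun vs len =>
      let padded := PySem.Str.zfill digits len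
      if padded ≠ upc then vs ++ [padded] else vs) variants
  let full_padded := PySem.Str.zfill upc 14
  if full_padded ∉ variants then variants ++ [full_padded] else variants

-- ===== PORT B =====
-- port of `list(dict.fromkeys(candidates))`: keep the first occurrence of each string.
-- Fuel (= list length) only makes the recursion structural; the 0-fuel branch is never reached.
def pyDedupFirstAux : Nat → List String → List String
  | _, [] => []
  | 0, _ :: _ => []
  | n + 1, x :: xs => x :: pyDedupFirstAux n (xs.filter (fun y => decide (y ≠ x)))

def pyDedupFirst (l : List String) : List String := pyDedupFirstAux l.length l

def upc_variants_py_alt (upc : String) : List String :=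
  let stripped := String.ofList (upc.toList.dropWhile (fun c => c == '0'))
  let digits := if stripped = "" then "0" else stripped
  pyDedupFirst [upc, PySem.Str.zfill digits 8, PySem.Str.zfill digits 12,
                PySem.Str.zfill digits 13, PySem.Str.zfill digits 14,
                PySem.Str.zfill upc 14]

-- ===== PRECONDITION & SPEC =====
-- On inputs starting with '0' whose zero-stripped remainder has at least 12 characters, A's
-- `padded != upc` guard appends the same padded string several times (the 8/12/13/14 pads collide),
-- so A returns a variants list with duplicates; B returns each variant once, which is intended.
def D_upc_variants_py (upc : String) : Prop :=
  upc.toList.head? = some '0' ∧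
  12 + (upc.toList.takeWhile (fun c => c = '0')).length ≤ upc.toList.length
instance (upc : String) : Decidable (D_upc_variants_py upc) := by unfold D_upc_variants_py; infer_instance

def Spec_upc_variants_py (upc : String) (out : List String) : Prop :=
  ¬ D_upc_variants_py upc → out = upc_variants_py_alt upc
instance (upc : String) (out : List String) : Decidable (Spec_upc_variants_py upc out) := by
  unfold Spec_upc_variants_py; infer_instance

def pvDiffWitness_upc_variants_py : String := "0111111111111"
def pvDiffWitnessOut_upc_variants_py : (List String) × (List String) :=
  (["0111111111111", "111111111111", "111111111111", "00111111111111"],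
   ["0111111111111", "111111111111", "00111111111111"])

-- ===== CLAIM (what is proved, stated in full; the proofs are below) =====
def Claim_unchanged_upc_variants_py : Prop :=
  ∀ (upc : String), Dom_upc_variants_py upc → Spec_upc_variants_py upc (upc_variants_py upc)
def Claim_changed_upc_variants_py : Prop :=
  Dom_upc_variants_py (pvDiffWitness_upc_variants_py) ∧
  D_upc_variants_py (pvDiffWitness_upc_variants_py) ∧
  upc_variants_py (pvDiffWitness_upc_variants_py) = pvDiffWitnessOut_upc_variants_py.1 ∧
  upc_variants_py_alt (pvDiffWitness_upc_variants_py) = pvDiffWitnessOut_upc_variants_py.2 ∧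
  pvDiffWitnessOut_upc_variants_py.1 ≠ pvDiffWitnessOut_upc_variants_py.2
def Claim_exact_upc_variants_py : Prop :=
  ∀ (upc : String), Dom_upc_variants_py upc → D_upc_variants_py upc →
    upc_variants_py upc ≠ upc_variants_py_alt upc

-- ===== LEMMAS AND PROOFS =====

theorem pvDIff (upc : String) : D_upc_variants_py upc ↔
    (upc.toList.head? = some '0' ∧ 12 ≤ (upc.toList.dropWhile (fun c => c == '0')).length) := by
  unfold D_upc_variants_py
  have hp : upc.toList.takeWhile (fun c => decide (c = '0'))
      = upc.toList.takeWhile (fun c => c == '0') := by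
    have hfun : (fun c : Char => decide (c = '0')) = (fun c => c == '0') := by
      funext c
      by_cases h : c = '0' <;> simp [h]
    rw [hfun]
  have hsum := congrArg List.length
    (List.takeWhile_append_dropWhile (p := fun c => c == '0') (l := upc.toList))
  rw [List.length_append] at hsum
  constructor
  · rintro ⟨h1, h2⟩
    refine ⟨h1, ?_⟩
    rw [hp] at h2
    omega
  · rintro ⟨h1, h2⟩
    refine ⟨h1, ?_⟩
    rw [hp]
    omega

theorem pvZfillLen (s : String) (k : Int) :
    (PySem.Str.zfill s k).toList.length = max s.toList.length k.toNat := by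
  rw [PySem.Str.toList_zfill, PySem.Chars.length_zfill]

theorem pvZfillOfLe (s : String) (k : Int) (h : k ≤ (s.toList.length : Int)) :
    PySem.Str.zfill s k = s := by
  apply String.toList_inj.mp
  rw [PySem.Str.toList_zfill]
  unfold PySem.Chars.zfill
  rw [if_pos h]

theorem pvNeOfLenNe {s t : String} (h : s.toList.length ≠ t.toList.length) : s ≠ t :=
  fun he => h (by rw [he])

theorem pvAuxCons (n : Nat) (x : String) (xs : List String) :
    pyDedupFirstAux (n + 1) (x :: xs) = x :: pyDedupFirstAux n (xs.filter (fun y => decide (y ≠ x))) :=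
  rfl

theorem pvAuxNil (n : Nat) : pyDedupFirstAux n [] = [] := by
  cases n <;> rfl

theorem pvAuxEqSelf : ∀ (n : Nat) (w : List String), w.length ≤ n → w.Nodup →
    pyDedupFirstAux n w = w := by
  intro n
  induction n with
  | zero =>
    intro w h _
    have : w = [] := List.length_eq_zero_iff.mp (Nat.le_zero.mp h)
    subst this; rfl
  | succ n ih =>
    intro w h hn
    cases w with
    | nil => rfl
    | cons x xs =>
      rw [pvAuxCons]
      have hx : x ∉ xs := (List.nodup_cons.mp hn).1
      have hfil : xs.filter (fun y => decide (y ≠ x)) = xs := by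
        apply List.filter_eq_self.mpr
        intro y hy
        simp only [decide_eq_true_eq]
        exact fun e => hx (e ▸ hy)
      rw [hfil, ih xs (by simpa using Nat.le_of_succ_le_succ h) (List.nodup_cons.mp hn).2]

theorem pvAuxAppendSingle : ∀ (n : Nat) (w : List String) (f : String),
    w.length + 1 ≤ n → w.Nodup →
    pyDedupFirstAux n (w ++ [f]) = w ++ if f ∈ w then [] else [f] := by
  intro n
  induction n with
  | zero => intro w f h _; omega
  | succ n ih =>
    intro w f h hn
    cases w with
    | nil =>
      rw [List.nil_append, pvAuxCons]
      simp [pvAuxNil]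
    | cons x xs =>
      have hx : x ∉ xs := (List.nodup_cons.mp hn).1
      have hxs : xs.Nodup := (List.nodup_cons.mp hn).2
      rw [List.cons_append, pvAuxCons, List.filter_append]
      have hfil : xs.filter (fun y => decide (y ≠ x)) = xs := by
        apply List.filter_eq_self.mpr
        intro y hy
        simp only [decide_eq_true_eq]
        exact fun e => hx (e ▸ hy)
      rw [hfil]
      by_cases hfx : f = x
      · have : [f].filter (fun y => decide (y ≠ x)) = [] := by simp [hfx]
        rw [this, List.append_nil,
            pvAuxEqSelf n xs (by simp at h; omega) hxs]
        simp [hfx]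
      · have : [f].filter (fun y => decide (y ≠ x)) = [f] := by simp [hfx]
        rw [this, ih xs f (by simp at h; omega) hxs]
        by_cases hm : f ∈ xs
        · simp [hm]
        · simp [hm, hfx]

theorem pvMemAux : ∀ (n : Nat) (l : List String) (y : String),
    y ∈ pyDedupFirstAux n l → y ∈ l := by
  intro n
  induction n with
  | zero =>
    intro l y hy
    cases l with
    | nil => exact (pvAuxNil 0) ▸ hy
    | cons x xs => simp [pyDedupFirstAux] at hy
  | succ n ih =>
    intro l y hy
    cases l with
    | nil => exact (pvAuxNil (n + 1)) ▸ hy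
    | cons x xs =>
      rw [pvAuxCons] at hy
      rcases List.mem_cons.mp hy with h | h
      · exact h ▸ List.mem_cons_self ..
      · exact List.mem_cons_of_mem _ (List.mem_of_mem_filter (ih _ _ h))

theorem pvAuxNodup : ∀ (n : Nat) (l : List String), (pyDedupFirstAux n l).Nodup := by
  intro n
  induction n with
  | zero => intro l; cases l <;> simp [pyDedupFirstAux]
  | succ n ih =>
    intro l
    cases l with
    | nil => simp [pvAuxNil]
    | cons x xs =>
      rw [pvAuxCons]
      refine List.nodup_cons.mpr ⟨?_, ih _⟩
      intro hx
      have := List.of_mem_filter (pvMemAux _ _ _ hx)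
      simp at this

theorem pvDedupNodup (l : List String) : (pyDedupFirst l).Nodup := pvAuxNodup _ _

-- A's loop over (8, 12, 13, 14) as a filter
theorem pvFoldlA (u d : String) :
    [(8 : Int), 12, 13, 14].foldl (fun vs len =>
        let padded := PySem.Str.zfill d len
        if padded ≠ u then vs ++ [padded] else vs) [u]
    = u :: ([PySem.Str.zfill d 8, PySem.Str.zfill d 12, PySem.Str.zfill d 13,
             PySem.Str.zfill d 14].filter (fun s => decide (s ≠ u))) := by
  simp only [List.foldl_cons, List.foldl_nil, List.filter_cons, List.filter_nil,
    decide_eq_true_eq]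
  split_ifs <;> simp_all

-- the shared core: A's guarded appends equal the first-occurrence dedup, given the kept pads are distinct
theorem pvCore (u f : String) (zs : List String)
    (hw : (zs.filter (fun s => decide (s ≠ u))).Nodup) :
    (if f ∉ (u :: zs.filter (fun s => decide (s ≠ u)))
     then (u :: zs.filter (fun s => decide (s ≠ u))) ++ [f]
     else u :: zs.filter (fun s => decide (s ≠ u)))
    = pyDedupFirst (u :: (zs ++ [f])) := by
  have hlen : (u :: (zs ++ [f])).length = (zs ++ [f]).length + 1 := rfl
  unfold pyDedupFirst
  rw [hlen, pvAuxCons, List.filter_append]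
  have hwl : (zs.filter (fun s => decide (s ≠ u))).length ≤ zs.length :=
    List.length_filter_le _ _
  by_cases hf : f = u
  · have hfe : [f].filter (fun y => decide (y ≠ u)) = [] := by simp [hf]
    rw [hfe, List.append_nil, pvAuxEqSelf _ _
      (by simp only [List.length_append, List.length_cons, List.length_nil]; omega) hw]
    rw [if_neg (not_not_intro (hf ▸ List.mem_cons_self ..))]
  · have hfe : [f].filter (fun y => decide (y ≠ u)) = [f] := by simp [hf]
    rw [hfe, pvAuxAppendSingle _ _ _
      (by simp only [List.length_append, List.length_cons, List.length_nil]; omega) hw]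
    by_cases hm : f ∈ zs.filter (fun s => decide (s ≠ u))
    · rw [if_neg (not_not_intro (List.mem_cons_of_mem _ hm)), if_pos hm, List.append_nil]
    · rw [if_pos ?_, if_neg hm, List.cons_append]
      intro hmem
      rcases List.mem_cons.mp hmem with e | e
      · exact hf e
      · exact hm e

-- distinctness of the kept pads when the digits string is short
theorem pvWNodupShort (u d : String) (h : d.toList.length ≤ 11) :
    ([PySem.Str.zfill d 8, PySem.Str.zfill d 12, PySem.Str.zfill d 13,
      PySem.Str.zfill d 14].filter (fun s => decide (s ≠ u))).Nodup := by
  apply List.Nodup.filter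
  have l8 := pvZfillLen d 8
  have l12 := pvZfillLen d 12
  have l13 := pvZfillLen d 13
  have l14 := pvZfillLen d 14
  refine List.nodup_cons.mpr ⟨?_, List.nodup_cons.mpr ⟨?_, List.nodup_cons.mpr
    ⟨?_, List.nodup_singleton _⟩⟩⟩
  · intro hmem
    simp only [List.mem_cons, List.not_mem_nil, or_false] at hmem
    rcases hmem with e | e | e <;> exact pvNeOfLenNe (by omega) e
  · intro hmem
    simp only [List.mem_cons, List.not_mem_nil, or_false] at hmem
    rcases hmem with e | e <;> exact pvNeOfLenNe (by omega) e
  · intro hmem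
    simp only [List.mem_cons, List.not_mem_nil, or_false] at hmem
    exact pvNeOfLenNe (by omega) hmem

-- distinctness of the kept pads when digits = upc (pads that differ from upc have their own length)
theorem pvFilterNeConsSelf (u : String) (l : List String) :
    List.filter (fun s => decide (s ≠ u)) (u :: l) = List.filter (fun s => decide (s ≠ u)) l := by
  simp

theorem pvWNodupEq (u : String) :
    ([PySem.Str.zfill u 8, PySem.Str.zfill u 12, PySem.Str.zfill u 13,
      PySem.Str.zfill u 14].filter (fun s => decide (s ≠ u))).Nodup := by
  by_cases h12 : (12 : Int) ≤ (u.toList.length : Int)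
  · have e8 : PySem.Str.zfill u 8 = u := pvZfillOfLe u 8 (by omega)
    have e12 : PySem.Str.zfill u 12 = u := pvZfillOfLe u 12 h12
    rw [e8, e12, pvFilterNeConsSelf, pvFilterNeConsSelf]
    by_cases h13 : (13 : Int) ≤ (u.toList.length : Int)
    · have e13 : PySem.Str.zfill u 13 = u := pvZfillOfLe u 13 h13
      rw [e13, pvFilterNeConsSelf]
      exact List.Nodup.filter _ (List.nodup_singleton _)
    · apply List.Nodup.filter
      refine List.nodup_cons.mpr ⟨?_, List.nodup_singleton _⟩
      intro hmem
      simp only [List.mem_cons, List.not_mem_nil, or_false] at hmem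
      have l13 := pvZfillLen u 13
      have l14 := pvZfillLen u 14
      exact pvNeOfLenNe (by omega) hmem
  · exact pvWNodupShort u u (by omega)

-- the digits string is either short or equal to upc, outside D_
theorem pvDigitsCase (upc : String) (hnd : ¬ D_upc_variants_py upc) :
    (if String.ofList (upc.toList.dropWhile (fun c => c == '0')) = "" then "0"
     else String.ofList (upc.toList.dropWhile (fun c => c == '0'))).toList.length ≤ 11 ∨
    (if String.ofList (upc.toList.dropWhile (fun c => c == '0')) = "" then "0"
     else String.ofList (upc.toList.dropWhile (fun c => c == '0'))) = upc := by
  rw [pvDIff] at hnd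
  by_cases h : 12 ≤ (upc.toList.dropWhile (fun c => c == '0')).length
  · right
    have hP : ¬ upc.toList.head? = some '0' := fun hp => hnd ⟨hp, h⟩
    cases hl : upc.toList with
    | nil => rw [hl] at h; simp at h
    | cons c t =>
      have hc : ¬ c = '0' := by
        intro hc0
        exact hP (by rw [hl, hc0]; rfl)
      have hdw : List.dropWhile (fun c => c == '0') (c :: t) = c :: t := by
        rw [List.dropWhile_cons]
        simp [hc]
      rw [hdw, ← hl, String.ofList_toList]
      rw [if_neg ?_]
      intro he
      rw [he] at hl
      simp at hl
  · left
    by_cases hs : String.ofList (upc.toList.dropWhile (fun c => c == '0')) = ""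
    · rw [if_pos hs]; decide
    · rw [if_neg hs, String.toList_ofList]
      omega

-- ===== VERDICT (by name: the statement is the Claim_ definition above) =====
theorem upc_variants_py_spec : Claim_unchanged_upc_variants_py := by
  intro upc _ hnd
  show upc_variants_py upc = upc_variants_py_alt upc
  unfold upc_variants_py upc_variants_py_alt
  dsimp only
  rw [pvFoldlA]
  have hcase := pvDigitsCase upc hnd
  set d := (if String.ofList (upc.toList.dropWhile (fun c => c == '0')) = "" then "0"
            else String.ofList (upc.toList.dropWhile (fun c => c == '0'))) with hd
  have hw : ([PySem.Str.zfill d 8, PySem.Str.zfill d 12, PySem.Str.zfill d 13,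
      PySem.Str.zfill d 14].filter (fun s => decide (s ≠ upc))).Nodup := by
    rcases hcase with h | h
    · exact pvWNodupShort upc d h
    · rw [h]; exact pvWNodupEq upc
  exact pvCore upc (PySem.Str.zfill upc 14)
    [PySem.Str.zfill d 8, PySem.Str.zfill d 12, PySem.Str.zfill d 13, PySem.Str.zfill d 14] hw

set_option maxHeartbeats 2000000 in
theorem upc_variants_py_changed : Claim_changed_upc_variants_py := by
  unfold Claim_changed_upc_variants_py; decide

theorem upc_variants_py_tight : Claim_exact_upc_variants_py := by
  intro upc _ hd
  rw [pvDIff] at hd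
  obtain ⟨hhead, hlen⟩ := hd
  obtain ⟨t, hu⟩ : ∃ t, upc.toList = '0' :: t := by
    cases hl : upc.toList with
    | nil => rw [hl] at hhead; simp at hhead
    | cons c t =>
      rw [hl] at hhead
      simp at hhead
      exact ⟨t, by rw [hhead]⟩
  have hdw : (upc.toList.dropWhile (fun c => c == '0')).length ≤ t.length := by
    rw [hu, List.dropWhile_cons]
    simp only [beq_self_eq_true, if_true]
    exact List.length_dropWhile_le _ _
  have hs : String.ofList (upc.toList.dropWhile (fun c => c == '0')) ≠ "" := by
    intro he
    have h0 : upc.toList.dropWhile (fun c => c == '0') = [] := by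
      simpa using congrArg String.toList he
    rw [h0] at hlen
    simp at hlen
  have hdigit : (if String.ofList (upc.toList.dropWhile (fun c => c == '0')) = "" then "0"
      else String.ofList (upc.toList.dropWhile (fun c => c == '0')))
      = String.ofList (upc.toList.dropWhile (fun c => c == '0')) := if_neg hs
  set d := String.ofList (upc.toList.dropWhile (fun c => c == '0')) with hds
  have hdl : d.toList.length = (upc.toList.dropWhile (fun c => c == '0')).length := by
    rw [hds, String.toList_ofList]
  have hdu : d ≠ upc := by
    apply pvNeOfLenNe
    rw [hu]
    simp only [List.length_cons]
    omega
  have h8 : PySem.Str.zfill d 8 = d := pvZfillOfLe d 8 (by omega)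
  have h12 : PySem.Str.zfill d 12 = d := pvZfillOfLe d 12 (by omega)
  intro heq
  have hBn : (upc_variants_py_alt upc).Nodup := by
    unfold upc_variants_py_alt
    exact pvDedupNodup _
  rw [← heq] at hBn
  revert hBn
  unfold upc_variants_py
  dsimp only
  rw [pvFoldlA, hdigit, h8, h12]
  have hfd : List.filter (fun s => decide (s ≠ upc))
      [d, d, PySem.Str.zfill d 13, PySem.Str.zfill d 14]
      = d :: d :: List.filter (fun s => decide (s ≠ upc))
          [PySem.Str.zfill d 13, PySem.Str.zfill d 14] := by
    simp only [List.filter_cons]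
    rw [if_pos (decide_eq_true hdu), if_pos (decide_eq_true hdu)]
  rw [hfd]
  have hX : ¬ (upc :: d :: d :: List.filter (fun s => decide (s ≠ upc))
      [PySem.Str.zfill d 13, PySem.Str.zfill d 14]).Nodup := by
    intro h
    exact (List.nodup_cons.mp ((List.nodup_cons.mp h).2)).1 (List.mem_cons_self ..)
  by_cases hC : PySem.Str.zfill upc 14 ∉ upc :: d :: d :: List.filter (fun s => decide (s ≠ upc))
      [PySem.Str.zfill d 13, PySem.Str.zfill d 14]
  · rw [if_pos hC]
    intro hn
    exact hX (List.Nodup.of_append_left hn)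
  · rw [if_neg hC]
    intro hn
    exact hX hn
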